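-- pv_equiv track=rewrite | github.com/k191105/FO2-Presentation-Results | experiments.py | _bits_to_edge_set
-- ===== SOURCE A (Python) =====
-- def _bits_to_edge_set(bits: int, n: int) -> set[tuple[int, int]]:
--     edges = set()
--     idx = 0
--     for i in range(n):
--         for j in range(i + 1, n):
--             if (bits >> idx) & 1:
--                 edges.add((i, j))
--             idx += 1
--     return edges
-- ===== SOURCE B (Python) =====
-- def _bits_to_edge_set(bits, n):
--     edges = set()
--     for i in range(n - 1):
--         w = n - 1 - i
--         chunk = (bits >> (i * (n - 1) - i * (i - 1) // 2)) % (1 << w)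
--         j = i + 1
--         while chunk:
--             chunk, r = divmod(chunk, 2)
--             if r:
--                 edges.add((i, j))
--             j += 1
--     return edges
-- ===== Notes on version B (the rewrite author's own statement) =====
-- stated objective: faster
-- what changed: B replaces A's nested per-slot loops with a running bit counter by per-row arithmetic digit extraction: each row's chunk is obtained in one shot via a closed-form triangular offset (bits >> off) % (1 << w), and an inner divmod loop consumes the chunk and stops as soon as it is zero, so empty slots above the highest set bit cost nothing.
import Mathlib
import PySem

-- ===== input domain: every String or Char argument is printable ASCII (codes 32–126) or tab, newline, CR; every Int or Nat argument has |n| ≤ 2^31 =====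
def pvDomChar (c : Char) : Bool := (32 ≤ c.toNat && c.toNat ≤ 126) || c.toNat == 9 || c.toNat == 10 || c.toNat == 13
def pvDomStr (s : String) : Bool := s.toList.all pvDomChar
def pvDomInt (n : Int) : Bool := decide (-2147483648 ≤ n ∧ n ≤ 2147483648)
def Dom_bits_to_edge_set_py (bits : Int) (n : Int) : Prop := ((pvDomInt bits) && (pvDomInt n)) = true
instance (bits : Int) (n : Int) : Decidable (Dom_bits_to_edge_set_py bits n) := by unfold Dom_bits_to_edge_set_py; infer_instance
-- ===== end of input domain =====

-- B replaces A's nested per-slot loops (running bit counter) by per-row chunk extraction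
-- via a closed-form triangular offset and an early-terminating divmod loop (measured
-- faster in a timing run; for negative bits the inner loops do comparable work).


-- ===== PORT A =====
-- literal port of A: nested loops over i < n, i+1 ≤ j < n, testing bit `idx` of `bits`
-- (idx only ever counts up from 0, so it is carried as a Nat — the shift width;
--  Python's truth test on the int `(bits >> idx) & 1` is `≠ 0`).
def bits_to_edge_set_py (bits : Int) (n : Int) : List (Int × Int) :=
  ((PySem.List.pyRange 0 n 1).foldl
    (fun (st : PySem.Set (Int × Int) × Nat) i =>
      (PySem.List.pyRange (i + 1) n 1).foldl
        (fun (st : PySem.Set (Int × Int) × Nat) j =>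
          ((if PySem.Int.band (bits >>> st.2) 1 ≠ 0 then PySem.Set.add st.1 (i, j) else st.1),
           st.2 + 1))
        st)
    (PySem.Set.empty, 0)).1

-- ===== PORT B =====
-- inner `while chunk:` loop of B; chunk is always ≥ 0 here, so the Python truth test
-- `while chunk:` is `0 < chunk` (the `chunk ≤ 0` guard only makes the recursion total),
-- and `if r:` on `r = chunk % 2` is `≠ 0`.
def pvChunkLoop (i : Int) (chunk : Int) (j : Int) (edges : PySem.Set (Int × Int)) :
    PySem.Set (Int × Int) :=
  if _h : chunk ≤ 0 then edges
  else
    pvChunkLoop i (PySem.Int.floordiv chunk 2) (j + 1)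
      (if PySem.Int.mod chunk 2 ≠ 0 then PySem.Set.add edges (i, j) else edges)
  termination_by chunk.toNat
  decreasing_by
    have h2 : PySem.Int.floordiv chunk 2 = chunk / 2 :=
      PySem.Int.floordiv_eq_ediv_of_pos (by omega)
    rw [h2]; omega

-- literal port of B: per-row chunk = (bits >> off) % (1 << w) with the closed-form
-- triangular offset (both shift amounts are ≥ 0 inside the loop; the right-shift
-- amount is carried as its toNat).
def bits_to_edge_set_py_alt (bits : Int) (n : Int) : List (Int × Int) :=
  (PySem.List.pyRange 0 (n - 1) 1).foldl
    (fun (edges : PySem.Set (Int × Int)) i =>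
      let w := n - 1 - i
      let chunk := PySem.Int.mod
        (bits >>> (i * (n - 1) - PySem.Int.floordiv (i * (i - 1)) 2).toNat)
        ((1 : Int) <<< (w.toNat : Int))
      pvChunkLoop i chunk (i + 1) edges)
    PySem.Set.empty

-- ===== PRECONDITION & SPEC =====
def Spec_bits_to_edge_set_py (bits : Int) (n : Int) (out : List (Int × Int)) : Prop := out = bits_to_edge_set_py_alt bits n
instance (bits : Int) (n : Int) (out : List (Int × Int)) : Decidable (Spec_bits_to_edge_set_py bits n out) := by unfold Spec_bits_to_edge_set_py; infer_instance

-- ===== CLAIM (what is proved, stated in full; the proofs are below) =====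
def Claim_equal_bits_to_edge_set_py : Prop := ∀ (bits : Int) (n : Int), Dom_bits_to_edge_set_py bits n → Spec_bits_to_edge_set_py bits n (bits_to_edge_set_py bits n)

-- ===== LEMMAS AND PROOFS =====

-- bit p of x, as both programs test it
def pvDg (x : Int) (p : Nat) : Bool := decide ((x / 2 ^ p) % 2 = 1)

-- canonical result: rows i = 0 … n-2, row i holding (i, i+1+k) for each set bit off+k, k < w(i)
def pvRowC (bits : Int) (i : Int) (off w : Nat) : List (Int × Int) :=
  (List.range w).filterMap (fun k => if pvDg bits (off + k) then some (i, i + 1 + k) else none)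

def pvCanon (bits n : Int) (i : Int) (off : Nat) : List (Int × Int) :=
  if _h : n - 1 ≤ i then []
  else pvRowC bits i off (n - 1 - i).toNat ++
       pvCanon bits n (i + 1) (off + (n - 1 - i).toNat)
  termination_by (n - 1 - i).toNat
  decreasing_by omega

theorem pvShiftR (x : Int) (k : Nat) : x >>> k = x / 2 ^ k := by
  rw [Int.shiftRight_eq_div_pow]; push_cast; rfl

theorem pvDg_succ (x : Int) (k : Nat) : pvDg x (k + 1) = pvDg (x / 2) k := by
  have h : x / 2 / 2 ^ k = x / 2 ^ (k + 1) := by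
    rw [Int.ediv_ediv_of_nonneg (by norm_num : (0:Int) ≤ 2)]
    congr 1
    rw [pow_succ]
    ring
  simp [pvDg, h]

theorem pvDg_shift (x : Int) (a p : Nat) : pvDg (x >>> a) p = pvDg x (a + p) := by
  have h : x / 2 ^ a / 2 ^ p = x / 2 ^ (a + p) := by
    rw [Int.ediv_ediv_of_nonneg (by positivity : (0:Int) ≤ 2 ^ a), ← pow_add]
  simp [pvDg, pvShiftR, h]

theorem pvDg_zero_val (p : Nat) : pvDg 0 p = false := by
  simp [pvDg]

theorem pvDg_emod (x : Int) (m p : Nat) (h : p < m) : pvDg (x % 2 ^ m) p = pvDg x p := by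
  obtain ⟨s, hs⟩ : ∃ s, m = p + (s + 1) := ⟨m - p - 1, by omega⟩
  have hpow : (2 : Int) ^ m = 2 ^ (s + 1) * 2 ^ p := by rw [← pow_add]; congr 1; omega
  have hx : x % 2 ^ m = x + (-(2 ^ (s + 1) * (x / 2 ^ m))) * 2 ^ p := by
    rw [Int.emod_def, hpow]; ring
  have hp0 : (2 : Int) ^ p ≠ 0 := by positivity
  have key : ∀ a t : Int, (a + -(2 * t)) % 2 = a % 2 := by intro a t; omega
  simp only [pvDg]
  rw [hx, Int.add_mul_ediv_right _ _ hp0,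
      show -((2:Int) ^ (s + 1) * (x / 2 ^ m)) = -(2 * (2 ^ s * (x / 2 ^ m))) by ring,
      key]

theorem pvAdd_append (s : PySem.Set (Int × Int)) (x : Int × Int) (h : x ∉ s) :
    PySem.Set.add s x = s ++ [x] := by
  simp [PySem.Set.add, PySem.Set.contains, h]

theorem pvMem_rowC (bits : Int) (i : Int) (off w : Nat) (p : Int × Int)
    (h : p ∈ pvRowC bits i off w) : p.1 = i := by
  simp only [pvRowC, List.mem_filterMap] at h
  obtain ⟨k, _, hk⟩ := h
  split at hk
  · cases hk; rfl
  · cases hk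

theorem pvCanon_unfold (bits n : Int) (i : Int) (off : Nat) (h : i < n) :
    pvCanon bits n i off
      = pvRowC bits i off (n - 1 - i).toNat ++
        pvCanon bits n (i + 1) (off + (n - 1 - i).toNat) := by
  by_cases h' : n - 1 ≤ i
  · have hw : (n - 1 - i).toNat = 0 := by omega
    rw [pvCanon, pvCanon]
    simp [h', hw, pvRowC, show n - 1 ≤ i + 1 by omega]
  · rw [pvCanon]; simp [h']

-- A's inner loop
theorem pvInnerA (bits n i : Int) :
    ∀ (m : Nat) (j : Int) (edges : PySem.Set (Int × Int)) (idx : Nat),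
      m = (n - j).toNat →
      (∀ p ∈ edges, p.1 < i ∨ (p.1 = i ∧ p.2 < j)) →
      (PySem.List.pyRange j n 1).foldl
        (fun (st : PySem.Set (Int × Int) × Nat) j' =>
          ((if PySem.Int.band (bits >>> st.2) 1 ≠ 0 then PySem.Set.add st.1 (i, j') else st.1),
           st.2 + 1)) (edges, idx)
      = (edges ++ (List.range m).filterMap
           (fun k => if pvDg bits (idx + k) then some (i, j + k) else none),
         idx + m) := by
  intro m
  induction m with
  | zero =>
    intro j edges idx hm _
    rw [PySem.List.pyRange_one_eq_nil (by omega)]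
    simp
  | succ m ih =>
    intro j edges idx hm hfresh
    rw [PySem.List.pyRange_one_cons (by omega), List.foldl_cons]
    have hband : PySem.Int.band (bits >>> idx) 1 = bits / 2 ^ idx % 2 := by
      rw [PySem.Int.band_one, PySem.Int.mod_eq_emod_of_pos (by omega), pvShiftR]
    have hrange : bits / 2 ^ idx % 2 = 0 ∨ bits / 2 ^ idx % 2 = 1 := by omega
    have hfresh' : (i, j) ∉ edges := by
      intro hmem
      rcases hfresh _ hmem with h1 | ⟨h2, h3⟩
      · simp at h1
      · simp at h3
    have hfresh2 : ∀ p ∈ edges ++ [(i, j)], p.1 < i ∨ (p.1 = i ∧ p.2 < j + 1) := by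
      intro p hp
      rcases List.mem_append.mp hp with hp | hp
      · rcases hfresh _ hp with h1 | ⟨h2, h3⟩
        · exact Or.inl h1
        · exact Or.inr ⟨h2, by omega⟩
      · simp at hp; subst hp; exact Or.inr ⟨rfl, by omega⟩
    have hfresh3 : ∀ p ∈ edges, p.1 < i ∨ (p.1 = i ∧ p.2 < j + 1) := by
      intro p hp
      rcases hfresh _ hp with h1 | ⟨h2, h3⟩
      · exact Or.inl h1
      · exact Or.inr ⟨h2, by omega⟩
    have htail : List.filterMap
          ((fun k => if pvDg bits (idx + k) then some (i, j + (k : Int)) else none) ∘ Nat.succ)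
          (List.range m)
        = List.filterMap
            (fun k => if pvDg bits ((idx + 1) + k) then some (i, (j + 1) + (k : Int)) else none)
            (List.range m) := by
      apply List.filterMap_congr
      intro k _
      simp only [Function.comp]
      rw [show idx + (Nat.succ k) = idx + 1 + k by omega,
          show j + (↑(Nat.succ k) : Int) = j + 1 + (k : Int) by push_cast; ring]
    rw [List.range_succ_eq_map, List.filterMap_cons, List.filterMap_map, htail]
    rcases hrange with h0 | h1
    · have hcond : ¬ (PySem.Int.band (bits >>> idx) 1 ≠ 0) := by rw [hband, h0]; simp
      have hdg : pvDg bits (idx + 0) = false := by simp [pvDg, h0]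
      rw [if_neg hcond, ih (j + 1) edges (idx + 1) (by omega) hfresh3,
          Prod.mk.injEq]
      refine ⟨?_, by omega⟩
      rw [hdg]
      simp
    · have hcond : (PySem.Int.band (bits >>> idx) 1 ≠ 0) := by rw [hband, h1]; simp
      have hdg : pvDg bits (idx + 0) = true := by simp [pvDg, h1]
      rw [if_pos hcond, pvAdd_append edges (i, j) hfresh',
          ih (j + 1) (edges ++ [(i, j)]) (idx + 1) (by omega) hfresh2,
          Prod.mk.injEq]
      refine ⟨?_, by omega⟩
      rw [hdg]
      simp

-- A's outer loop
theorem pvOuterA (bits n : Int) :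
    ∀ (m : Nat) (i : Int) (edges : PySem.Set (Int × Int)) (idx : Nat),
      m = (n - i).toNat →
      (∀ p ∈ edges, p.1 < i) →
      ∃ idx', (PySem.List.pyRange i n 1).foldl
        (fun (st : PySem.Set (Int × Int) × Nat) i' =>
          (PySem.List.pyRange (i' + 1) n 1).foldl
            (fun (st : PySem.Set (Int × Int) × Nat) j' =>
              ((if PySem.Int.band (bits >>> st.2) 1 ≠ 0 then PySem.Set.add st.1 (i', j') else st.1),
               st.2 + 1)) st) (edges, idx)
      = (edges ++ pvCanon bits n i idx, idx') := by
  intro m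
  induction m with
  | zero =>
    intro i edges idx hm _
    rw [PySem.List.pyRange_one_eq_nil (by omega)]
    rw [pvCanon]
    simp [show n - 1 ≤ i by omega]
  | succ m ih =>
    intro i edges idx hm hfresh
    rw [PySem.List.pyRange_one_cons (by omega), List.foldl_cons]
    have hfreshI : ∀ p ∈ edges, p.1 < i ∨ (p.1 = i ∧ p.2 < i + 1) := by
      intro p hp; exact Or.inl (hfresh _ hp)
    rw [pvInnerA bits n i (n - (i + 1)).toNat (i + 1) edges idx rfl hfreshI]
    have hrow : (List.range (n - (i + 1)).toNat).filterMap
        (fun k => if pvDg bits (idx + k) then some (i, i + 1 + k) else none)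
        = pvRowC bits i idx (n - 1 - i).toNat := by
      rw [pvRowC, show (n - 1 - i).toNat = (n - (i + 1)).toNat by omega]
    rw [hrow, show (n - (i + 1)).toNat = (n - 1 - i).toNat by omega]
    have hfresh2 : ∀ p ∈ edges ++ pvRowC bits i idx (n - 1 - i).toNat, p.1 < i + 1 := by
      intro p hp
      rcases List.mem_append.mp hp with hp | hp
      · have := hfresh _ hp; omega
      · have := pvMem_rowC bits i idx _ p hp; omega
    obtain ⟨idx', hrec⟩ := ih (i + 1) (edges ++ pvRowC bits i idx (n - 1 - i).toNat)
      (idx + (n - 1 - i).toNat) (by omega) hfresh2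
    refine ⟨idx', ?_⟩
    rw [hrec, pvCanon_unfold bits n i idx (by omega), List.append_assoc]

-- B's inner loop
theorem pvChunkMain (i : Int) :
    ∀ (w : Nat) (chunk j : Int) (edges : PySem.Set (Int × Int)),
      0 ≤ chunk → chunk < 2 ^ w →
      (∀ p ∈ edges, p.1 < i ∨ (p.1 = i ∧ p.2 < j)) →
      pvChunkLoop i chunk j edges
      = edges ++ (List.range w).filterMap
          (fun k => if pvDg chunk k then some (i, j + k) else none) := by
  intro w
  induction w with
  | zero =>
    intro chunk j edges h0 hlt _
    have hc : chunk = 0 := by norm_num at hlt; omega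
    subst hc
    rw [pvChunkLoop]
    simp
  | succ w ih =>
    intro chunk j edges h0 hlt hfresh
    rw [pvChunkLoop]
    by_cases hz : chunk ≤ 0
    · have hc : chunk = 0 := by omega
      subst hc
      simp [pvDg_zero_val]
    · rw [dif_neg hz]
      have hfd : PySem.Int.floordiv chunk 2 = chunk / 2 :=
        PySem.Int.floordiv_eq_ediv_of_pos (by omega)
      have hmd : PySem.Int.mod chunk 2 = chunk % 2 :=
        PySem.Int.mod_eq_emod_of_pos (by omega)
      have hpow : (2 : Int) ^ (w + 1) = 2 ^ w * 2 := by ring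
      rw [hpow] at hlt
      have hdiv0 : 0 ≤ chunk / 2 := by omega
      have hdivlt : chunk / 2 < 2 ^ w := by omega
      have hrange : chunk % 2 = 0 ∨ chunk % 2 = 1 := by omega
      have hfresh' : (i, j) ∉ edges := by
        intro hmem
        rcases hfresh _ hmem with h1 | ⟨h2, h3⟩
        · simp at h1
        · simp at h3
      have hfresh2 : ∀ p ∈ edges ++ [(i, j)], p.1 < i ∨ (p.1 = i ∧ p.2 < j + 1) := by
        intro p hp
        rcases List.mem_append.mp hp with hp | hp
        · rcases hfresh _ hp with h1 | ⟨h2, h3⟩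
          · exact Or.inl h1
          · exact Or.inr ⟨h2, by omega⟩
        · simp at hp; subst hp; exact Or.inr ⟨rfl, by omega⟩
      have hfresh3 : ∀ p ∈ edges, p.1 < i ∨ (p.1 = i ∧ p.2 < j + 1) := by
        intro p hp
        rcases hfresh _ hp with h1 | ⟨h2, h3⟩
        · exact Or.inl h1
        · exact Or.inr ⟨h2, by omega⟩
      have htail : List.filterMap
            ((fun k => if pvDg chunk k then some (i, j + (k : Int)) else none) ∘ Nat.succ)
            (List.range w)
          = List.filterMap
              (fun k => if pvDg (chunk / 2) k then some (i, (j + 1) + (k : Int)) else none)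
              (List.range w) := by
        apply List.filterMap_congr
        intro k _
        simp only [Function.comp]
        rw [show (Nat.succ k) = k + 1 from rfl, pvDg_succ,
            show j + (↑(k + 1) : Int) = j + 1 + (k : Int) by push_cast; ring]
      rw [List.range_succ_eq_map, List.filterMap_cons, List.filterMap_map, htail]
      rcases hrange with hr0 | hr1
      · have hcond : ¬ (PySem.Int.mod chunk 2 ≠ 0) := by rw [hmd, hr0]; simp
        have hdg : pvDg chunk 0 = false := by simp [pvDg, hr0]
        rw [if_neg hcond, hfd, ih (chunk / 2) (j + 1) edges hdiv0 hdivlt hfresh3]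
        rw [hdg]
        simp
      · have hcond : (PySem.Int.mod chunk 2 ≠ 0) := by rw [hmd, hr1]; simp
        have hdg : pvDg chunk 0 = true := by simp [pvDg, hr1]
        rw [if_pos hcond, pvAdd_append edges (i, j) hfresh', hfd,
            ih (chunk / 2) (j + 1) (edges ++ [(i, j)]) hdiv0 hdivlt hfresh2]
        rw [hdg]
        simp

-- the closed-form triangular offset steps by the row width
theorem pvOff_step (n i : Int) (_h0 : 0 ≤ i) (_h1 : i < n - 1) :
    (i + 1) * (n - 1) - (i + 1) * i / 2 = (i * (n - 1) - i * (i - 1) / 2) + (n - 1 - i) := by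
  have hkey : (i + 1) * i = i * (i - 1) + i * 2 := by ring
  have : (i + 1) * i / 2 = i * (i - 1) / 2 + i := by
    rw [hkey, Int.add_mul_ediv_right _ _ (by omega : (2:Int) ≠ 0)]
  rw [this]
  ring

theorem pvOff_nonneg (n i : Int) (h0 : 0 ≤ i) (h1 : i ≤ n - 1) :
    0 ≤ i * (n - 1) - i * (i - 1) / 2 := by
  have hnn : 0 ≤ i * (i - 1) := by
    rcases eq_or_lt_of_le h0 with h | h
    · simp [← h]
    · exact mul_nonneg (by omega) (by omega)
  have h2 : i * (i - 1) / 2 ≤ i * (i - 1) := Int.ediv_le_self _ hnn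
  have h3 : i * (i - 1) ≤ i * (n - 1) := by
    apply mul_le_mul_of_nonneg_left (by omega) (by omega)
  omega

-- B's outer loop
theorem pvOuterB (bits n : Int) :
    ∀ (m : Nat) (i : Int) (edges : PySem.Set (Int × Int)),
      m = (n - 1 - i).toNat → 0 ≤ i →
      (∀ p ∈ edges, p.1 < i) →
      (PySem.List.pyRange i (n - 1) 1).foldl
        (fun (edges : PySem.Set (Int × Int)) i' =>
          let w := n - 1 - i'
          let chunk := PySem.Int.mod
            (bits >>> (i' * (n - 1) - PySem.Int.floordiv (i' * (i' - 1)) 2).toNat)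
            ((1 : Int) <<< (w.toNat : Int))
          pvChunkLoop i' chunk (i' + 1) edges) edges
      = edges ++ pvCanon bits n i (i * (n - 1) - i * (i - 1) / 2).toNat := by
  intro m
  induction m with
  | zero =>
    intro i edges hm h0 _
    rw [PySem.List.pyRange_one_eq_nil (by omega)]
    rw [pvCanon]
    simp [show n - 1 ≤ i by omega]
  | succ m ih =>
    intro i edges hm h0 hfresh
    rw [PySem.List.pyRange_one_cons (by omega), List.foldl_cons]
    simp only []
    have hfd : PySem.Int.floordiv (i * (i - 1)) 2 = i * (i - 1) / 2 :=
      PySem.Int.floordiv_eq_ediv_of_pos (by omega)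
    have hsl : (1 : Int) <<< (((n - 1 - i).toNat : Nat) : Int) = 2 ^ (n - 1 - i).toNat :=
      Int.one_shiftLeft _
    have hpos : (0 : Int) < 2 ^ (n - 1 - i).toNat := by positivity
    have hmd : ∀ x : Int, PySem.Int.mod x ((1 : Int) <<< (((n - 1 - i).toNat : Nat) : Int))
        = x % 2 ^ (n - 1 - i).toNat := by
      intro x
      rw [hsl]
      exact PySem.Int.mod_eq_emod_of_pos hpos
    set off : Int := i * (n - 1) - i * (i - 1) / 2 with hoff
    set wN : Nat := (n - 1 - i).toNat with hwN
    set sh : Int := bits >>> off.toNat with hsh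
    have hchunk0 : 0 ≤ sh % 2 ^ wN := Int.emod_nonneg _ (by positivity)
    have hchunklt : sh % 2 ^ wN < 2 ^ wN := Int.emod_lt_of_pos _ hpos
    have hfreshI : ∀ p ∈ edges, p.1 < i ∨ (p.1 = i ∧ p.2 < i + 1) := by
      intro p hp; exact Or.inl (hfresh _ hp)
    rw [hfd, hmd, pvChunkMain i wN (sh % 2 ^ wN) (i + 1) edges hchunk0 hchunklt hfreshI]
    have hoffnn : 0 ≤ off := pvOff_nonneg n i h0 (by omega)
    have hdig : (List.range wN).filterMap
          (fun k => if pvDg (sh % 2 ^ wN) k then some (i, i + 1 + (k : Int)) else none)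
        = pvRowC bits i off.toNat wN := by
      rw [pvRowC]
      apply List.filterMap_congr
      intro k hk
      rw [List.mem_range] at hk
      rw [pvDg_emod _ _ _ hk, hsh, pvDg_shift]
    rw [hdig]
    have hfresh2 : ∀ p ∈ edges ++ pvRowC bits i off.toNat wN, p.1 < i + 1 := by
      intro p hp
      rcases List.mem_append.mp hp with hp | hp
      · have := hfresh _ hp; omega
      · have := pvMem_rowC bits i off.toNat _ p hp; omega
    have hrec := ih (i + 1) (edges ++ pvRowC bits i off.toNat wN) (by omega) (by omega) hfresh2
    rw [hrec, pvCanon_unfold bits n i off.toNat (by omega), List.append_assoc]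
    have hstep := pvOff_step n i h0 (by omega)
    congr 3
    have h1 : 0 ≤ (i + 1) * (n - 1) - (i + 1) * ((i + 1) - 1) / 2 :=
      pvOff_nonneg n (i + 1) (by omega) (by omega)
    have h2 : (i + 1) * ((i + 1) - 1) = (i + 1) * i := by ring
    rw [show (i + 1) * ((i + 1) - 1) / 2 = (i + 1) * i / 2 by rw [h2]] at *
    omega

-- ===== VERDICT (by name: the statement is the Claim_ definition above) =====
theorem bits_to_edge_set_py_spec : Claim_equal_bits_to_edge_set_py := by
  intro bits n _
  unfold Spec_bits_to_edge_set_py bits_to_edge_set_py bits_to_edge_set_py_alt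
  obtain ⟨idx', hA⟩ := pvOuterA bits n (n - 0).toNat 0 PySem.Set.empty 0 rfl
    (by simp [PySem.Set.empty])
  have hB := pvOuterB bits n (n - 1 - 0).toNat 0 PySem.Set.empty rfl (by omega)
    (by simp [PySem.Set.empty])
  rw [hA, hB]
  norm_num
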